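-- pv_equiv track=rewrite | github.com/FelipeAscencio/Backtracking_LP_Resolution | ReadyToRun/funciones.py | aproximacion2
-- ===== SOURCE A (Python) =====
-- def aproximacion2(maestros, num_grupos):
--     maestros_ordenados2 = sorted(maestros, key=lambda x: x[1], reverse=True)
--     resultado2 = [([], 0)] * num_grupos
--     ida = True
--     grupo = 0
--     for guerrero in maestros_ordenados2:
--         guerreros, sumatoria = resultado2[grupo]
--         resultado2[grupo] = (guerreros + [guerrero[0]], sumatoria + guerrero[1])
--         if ida:
--             grupo += 1
--             if grupo == num_grupos:
--                 grupo = num_grupos - 1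
--                 ida = False
--         else:
--             grupo -= 1
--             if grupo == -1:
--                 grupo = 0
--                 ida = True
--     return resultado2
-- ===== SOURCE B (Python) =====
-- def aproximacion2(maestros, num_grupos):
--     orden = sorted(maestros, key=lambda x: x[1], reverse=True)
--     periodo = 2 * num_grupos
--     resultado = []
--     for g in range(num_grupos):
--         ida = orden[g::periodo]
--         vuelta = orden[periodo - 1 - g::periodo]
--         nombres = []
--         for p, q in zip(ida, vuelta):
--             nombres += [p[0], q[0]]
--         if len(vuelta) < len(ida):
--             nombres.append(ida[-1][0])
--         suma = sum(x[1] for x in ida) + sum(x[1] for x in vuelta)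
--         resultado.append((nombres, suma))
--     return resultado
-- ===== Notes on version B (the rewrite author's own statement) =====
-- stated objective: alternative
-- what changed: Instead of A's single dealing loop with mutable direction state (ida flag, bouncing grupo counter) over a preallocated result, B builds each group independently from two strided slices of the sorted list (orden[g::2k] and orden[2k-1-g::2k], the two snake directions), interleaves their names and sums the two slices.
import Mathlib
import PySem

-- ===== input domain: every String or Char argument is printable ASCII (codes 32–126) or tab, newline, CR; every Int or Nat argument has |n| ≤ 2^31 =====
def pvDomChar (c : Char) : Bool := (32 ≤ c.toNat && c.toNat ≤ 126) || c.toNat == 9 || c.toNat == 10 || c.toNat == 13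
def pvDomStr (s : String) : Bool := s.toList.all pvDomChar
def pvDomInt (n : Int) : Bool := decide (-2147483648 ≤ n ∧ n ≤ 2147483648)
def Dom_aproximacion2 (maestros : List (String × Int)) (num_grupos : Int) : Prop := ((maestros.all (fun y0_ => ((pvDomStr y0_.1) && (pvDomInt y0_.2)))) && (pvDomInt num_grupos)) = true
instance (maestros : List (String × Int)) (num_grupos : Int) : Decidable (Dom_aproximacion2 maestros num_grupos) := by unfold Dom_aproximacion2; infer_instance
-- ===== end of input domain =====

-- B builds each group independently from two strided slices of the sorted list (one per snake
-- direction), interleaving them, instead of A's single dealing loop with mutable direction state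
-- (objective: alternative).


-- ===== PORT A =====
-- one iteration of A's for-loop: place guerrero at resultado2[grupo], then bounce grupo/ida.
-- pyGetD/pySetD are exact here: under Pre_ the loop keeps 0 ≤ grupo < num_grupos = len resultado2.
def pasoA (num_grupos : Int) (st : List (List String × Int) × Bool × Int) (guerrero : String × Int) :
    List (List String × Int) × Bool × Int :=
  let res := st.1
  let ida := st.2.1
  let grupo := st.2.2
  let gs := PySem.List.pyGetD res grupo ([], 0)
  let res' := PySem.List.pySetD res grupo (gs.1 ++ [guerrero.1], gs.2 + guerrero.2)
  if ida then
    if grupo + 1 = num_grupos then (res', false, num_grupos - 1) else (res', true, grupo + 1)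
  else
    if grupo - 1 = -1 then (res', true, 0) else (res', false, grupo - 1)

def aproximacion2 (maestros : List (String × Int)) (num_grupos : Int) : List (List String × Int) :=
  let maestros_ordenados2 := PySem.List.sorted maestros (fun x => x.2) true
  (maestros_ordenados2.foldl (pasoA num_grupos) (List.replicate num_grupos.toNat ([], 0), true, 0)).1

-- ===== PORT B =====
-- hand port of the extended slice xs[s::p]: elements at indices s, s+p, s+2p, … — exact for
-- 0 ≤ s and 1 ≤ p, which holds at every call below (s ∈ [0, 2n), p = 2n ≥ 2).
def everyNth {α : Type} (p : Nat) : List α → List α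
  | [] => []
  | x :: t => x :: everyNth p (t.drop (p - 1))
termination_by xs => xs.length
decreasing_by simp [List.length_drop]

def strideSlice {α : Type} (xs : List α) (s p : Int) : List α :=
  everyNth p.toNat (xs.drop s.toNat)

-- the body of B's 'for g in range(num_grupos)' loop
def grupoB (orden : List (String × Int)) (periodo g : Int) : List String × Int :=
  let ida := strideSlice orden g periodo
  let vuelta := strideSlice orden (periodo - 1 - g) periodo
  let nombres := (ida.zip vuelta).foldl (fun acc pq => acc ++ [pq.1.1, pq.2.1]) []
  let nombres := if vuelta.length < ida.length
    then nombres ++ [(PySem.List.pyGetD ida (-1) ("", 0)).1] else nombres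
  let suma := ida.foldl (fun s x => s + x.2) 0 + vuelta.foldl (fun s x => s + x.2) 0
  (nombres, suma)

def aproximacion2_alt (maestros : List (String × Int)) (num_grupos : Int) : List (List String × Int) :=
  let orden := PySem.List.sorted maestros (fun x => x.2) true
  let periodo := 2 * num_grupos
  (PySem.List.pyRange 0 num_grupos 1).foldl (fun res g => res ++ [grupoB orden periodo g]) []

-- ===== PRECONDITION & SPEC =====
-- Pre_ excludes exactly the inputs where A raises IndexError: num_grupos ≤ 0 with a nonempty list
-- (resultado2 is then empty and resultado2[grupo] fails); B returns [] there.
def Pre_aproximacion2 (maestros : List (String × Int)) (num_grupos : Int) : Prop :=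
  1 ≤ num_grupos ∨ maestros = []
instance (maestros : List (String × Int)) (num_grupos : Int) : Decidable (Pre_aproximacion2 maestros num_grupos) := by unfold Pre_aproximacion2; infer_instance
def pvWitness_aproximacion2 : (List (String × Int)) × Int := ([("ana", 3), ("bob", 1), ("eva", 2)], 2)

def Spec_aproximacion2 (maestros : List (String × Int)) (num_grupos : Int) (out : List (List String × Int)) : Prop := out = aproximacion2_alt maestros num_grupos
instance (maestros : List (String × Int)) (num_grupos : Int) (out : List (List String × Int)) : Decidable (Spec_aproximacion2 maestros num_grupos out) := by unfold Spec_aproximacion2; infer_instance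

-- ===== CLAIM (what is proved, stated in full; the proofs are below) =====
def Claim_equal_aproximacion2 : Prop := ∀ (maestros : List (String × Int)) (num_grupos : Int), Dom_aproximacion2 maestros num_grupos → Pre_aproximacion2 maestros num_grupos → Spec_aproximacion2 maestros num_grupos (aproximacion2 maestros num_grupos)
-- ===== LEMMAS AND PROOFS =====

-- proof-side intermediate: the dealing loop rephrased on two parallel lists with a running index
def snakeIdx (num_grupos i : Int) : Int :=
  let m := PySem.Int.mod i (2 * num_grupos)
  if m < num_grupos then m else 2 * num_grupos - 1 - m

def pasoM (num_grupos : Int) (st : (List (List String) × List Int) × Int) (guerrero : String × Int) :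
    (List (List String) × List Int) × Int :=
  let g := snakeIdx num_grupos st.2
  ((PySem.List.pySetD st.1.1 g (PySem.List.pyGetD st.1.1 g [] ++ [guerrero.1]),
    PySem.List.pySetD st.1.2 g (PySem.List.pyGetD st.1.2 g 0 + guerrero.2)), st.2 + 1)

-- proof-side: the sublist of elements whose (shifting) offsets a < b hit 0 — the two
-- residue classes mod the period, in position order
def selOff {α : Type} (p : Int) : Int → Int → List α → List α
  | _, _, [] => []
  | a, b, x :: t => if a = 0 then x :: selOff p (b - 1) (p - 1) t else selOff p (a - 1) (b - 1) t

-- proof-side: perfect interleave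
def inter {α : Type} : List α → List α → List α
  | [], v => v
  | x :: u, v => x :: inter v u
termination_by u v => u.length + v.length
decreasing_by simp; omega

-- setting the same slot of two zipped equal-length lists
lemma zip_set {α β : Type} : ∀ (a : List α) (b : List β) (k : Nat) (x : α) (y : β),
    a.length = b.length → ((a.zip b).set k (x, y)) = (a.set k x).zip (b.set k y)
  | [], [], _, _, _, _ => rfl
  | _ :: _, [], _, _, _, h => by simp at h
  | [], _ :: _, _, _, _, h => by simp at h
  | a :: as, b :: bs, 0, x, y, h => by simp
  | a :: as, b :: bs, k + 1, x, y, h => by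
      simp only [List.zip_cons_cons, List.set_cons_succ]
      rw [zip_set as bs k x y (by simpa using h)]

lemma mod_period (n m q : Int) (hn : 1 ≤ n) (hm0 : 0 ≤ m) (hm : m < 2 * n) :
    PySem.Int.mod (m + 2 * n * q) (2 * n) = m := by
  rw [PySem.Int.mod_eq_emod_of_pos (by omega), Int.add_mul_emod_self_left,
    Int.emod_eq_of_lt hm0 hm]

-- loop correspondence: A's fold on the zipped state with ida/grupo determined by the phase m
-- equals the phase-free fold pasoM on the parallel-lists state with running index i = m + 2n·q.
lemma core (n : Int) (hn : 1 ≤ n) :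
    ∀ (xs : List (String × Int)) (G : List (List String)) (S : List Int) (m q : Int),
      G.length = n.toNat → S.length = n.toNat → 0 ≤ m → m < 2 * n → 0 ≤ q →
      (xs.foldl (pasoA n) (G.zip S, decide (m < n), if m < n then m else 2 * n - 1 - m)).1
        = ((xs.foldl (pasoM n) ((G, S), m + 2 * n * q)).1.1.zip
           (xs.foldl (pasoM n) ((G, S), m + 2 * n * q)).1.2) := by
  intro xs
  induction xs with
  | nil => intro G S m q hG hS hm0 hm hq; rfl
  | cons x xs ih =>
    intro G S m q hG hS hm0 hm hq
    set g : Int := if m < n then m else 2 * n - 1 - m with hgdef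
    have hg0 : 0 ≤ g := by simp only [hgdef]; split <;> omega
    have hgn : g < n := by simp only [hgdef]; split <;> omega
    have hgG : g.toNat < G.length := by omega
    have hgS : g.toNat < S.length := by omega
    set G' : List (List String) := G.set g.toNat (G[g.toNat] ++ [x.1]) with hG'
    set S' : List Int := S.set g.toNat (S[g.toNat] + x.2) with hS'
    have hG'len : G'.length = n.toNat := by simp [hG', hG]
    have hS'len : S'.length = n.toNat := by simp [hS', hS]
    set m' : Int := if m + 1 < 2 * n then m + 1 else 0 with hm'
    set q' : Int := if m + 1 < 2 * n then q else q + 1 with hq'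
    have hiter : m + 2 * n * q + 1 = m' + 2 * n * q' := by
      simp only [hm', hq']; split
      · ring
      · have h2 : m + 1 = 2 * n := by omega
        linear_combination h2
    have hA : pasoA n (G.zip S, decide (m < n), g) x
        = (G'.zip S', decide (m' < n), if m' < n then m' else 2 * n - 1 - m') := by
      show (if decide (m < n) = true then _ else _) = _
      have hget : PySem.List.pyGetD (G.zip S) g ([], 0) = (G[g.toNat], S[g.toNat]) := by
        rw [PySem.List.pyGetD_eq_getElem _ _ hg0 (by simp; omega)]
        exact List.getElem_zip
      have hset : PySem.List.pySetD (G.zip S) g (G[g.toNat] ++ [x.1], S[g.toNat] + x.2)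
          = G'.zip S' := by
        rw [PySem.List.pySetD_of_nonneg _ _ hg0, zip_set _ _ _ _ _ (by omega)]
      rw [hget]
      simp only [hset]
      by_cases hlt : m < n
      · rw [if_pos (by simp [hlt])]
        have hg : g = m := by simp [hgdef, hlt]
        by_cases hend : m + 1 = n
        · rw [hg, if_pos hend]
          have : ¬ m' < n := by simp [hm']; omega
          rw [if_neg this]
          simp only [hm', if_pos (by omega : m + 1 < 2 * n)]
          simp
          omega
        · rw [hg, if_neg hend]
          have h1 : m' = m + 1 := by simp [hm']; omega
          have h2 : m' < n := by omega
          rw [if_pos h2]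
          simp [h1]; omega
      · rw [if_neg (by simp [hlt])]
        have hg : g = 2 * n - 1 - m := by simp [hgdef, hlt]
        by_cases hend : m = 2 * n - 1
        · rw [if_pos (by omega)]
          have h1 : m' = 0 := by simp [hm']; omega
          rw [if_pos (by omega)]
          simp [h1]; omega
        · rw [if_neg (by omega)]
          have h1 : m' = m + 1 := by simp [hm']; omega
          have h2 : ¬ m' < n := by omega
          rw [if_neg h2]
          simp [h1, hg]; constructor <;> omega
    have hB : pasoM n ((G, S), m + 2 * n * q) x = ((G', S'), m' + 2 * n * q') := by
      show ((PySem.List.pySetD G (snakeIdx n (m + 2 * n * q)) _,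
             PySem.List.pySetD S (snakeIdx n (m + 2 * n * q)) _), m + 2 * n * q + 1) = _
      have hsnake : snakeIdx n (m + 2 * n * q) = g := by
        show (let mm := PySem.Int.mod (m + 2 * n * q) (2 * n);
              if mm < n then mm else 2 * n - 1 - mm) = g
        simp only [mod_period n m q hn hm0 hm, hgdef]
      rw [hsnake, hiter]
      rw [PySem.List.pySetD_of_nonneg _ _ hg0, PySem.List.pySetD_of_nonneg _ _ hg0]
      rw [PySem.List.pyGetD_eq_getElem _ _ hg0 (by simp; omega),
          PySem.List.pyGetD_eq_getElem _ _ hg0 (by simp; omega)]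
    rw [List.foldl_cons, List.foldl_cons, hA, hB]
    exact ih G' S' m' q' hG'len hS'len (by simp [hm']; split <;> omega)
      (by simp [hm']; split <;> omega) (by simp [hq']; split <;> omega)

-- pasoM preserves the lengths of both lists
lemma foldM_len (n : Int) : ∀ (xs : List (String × Int)) (G : List (List String)) (S : List Int) (i : Int),
    ((xs.foldl (pasoM n) ((G, S), i)).1.1.length = G.length ∧
     (xs.foldl (pasoM n) ((G, S), i)).1.2.length = S.length) := by
  intro xs
  induction xs with
  | nil => intro G S i; exact ⟨rfl, rfl⟩
  | cons x t ih =>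
    intro G S i
    have h := ih (PySem.List.pySetD G (snakeIdx n i) (PySem.List.pyGetD G (snakeIdx n i) [] ++ [x.1]))
      (PySem.List.pySetD S (snakeIdx n i) (PySem.List.pyGetD S (snakeIdx n i) 0 + x.2)) (i + 1)
    simpa [pasoM, PySem.List.length_pySetD] using h

-- the slot g of the pasoM fold collects exactly the elements whose shifting offsets hit 0:
-- offsets a,b are (in either order) the residues (g-i) mod 2n and (2n-1-g-i) mod 2n,
-- carried as divisibility facts.
lemma getD_setD_self {beta : Type} (L : List beta) (j : Int) (v d : beta)
    (h0 : 0 ≤ j) (h : j.toNat < L.length) :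
    PySem.List.pyGetD (PySem.List.pySetD L j v) j d = v := by
  rw [PySem.List.pySetD_of_nonneg _ _ h0,
      PySem.List.pyGetD_eq_getElem _ _ h0 (by simp only [List.length_set]; omega)]
  exact List.getElem_set_self _

lemma getD_setD_ne {beta : Type} (L : List beta) (j k : Int) (v d : beta)
    (hj0 : 0 ≤ j) (hk0 : 0 ≤ k) (hne : j ≠ k) (hk : k.toNat < L.length) :
    PySem.List.pyGetD (PySem.List.pySetD L j v) k d = PySem.List.pyGetD L k d := by
  rw [PySem.List.pySetD_of_nonneg _ _ hj0,
      PySem.List.pyGetD_eq_getElem _ _ hk0 (by simp only [List.length_set]; omega),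
      PySem.List.pyGetD_eq_getElem _ _ hk0 (by omega)]
  exact List.getElem_set_ne (by omega) _

-- where the snake index points, phrased through divisibility of the two offsets
lemma snake_eq_iff (n g i : Int) (hn : 1 ≤ n) (hg0 : 0 ≤ g) (hgn : g < n) :
    snakeIdx n i = g ↔ (2 * n ∣ (g - i) ∨ 2 * n ∣ (2 * n - 1 - g - i)) := by
  have hp : (0:Int) < 2 * n := by omega
  have hmod : PySem.Int.mod i (2 * n) = i.emod (2 * n) := PySem.Int.mod_eq_emod_of_pos hp
  have hm0 : 0 ≤ i.emod (2 * n) := Int.emod_nonneg i (by omega)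
  have hmlt : i.emod (2 * n) < 2 * n := Int.emod_lt_of_pos i hp
  have key : ∀ r : Int, 0 ≤ r → r < 2 * n → (i.emod (2 * n) = r ↔ 2 * n ∣ (r - i)) := by
    intro r hr0 hrlt
    rw [Int.dvd_iff_emod_eq_zero, ← Int.emod_eq_emod_iff_emod_sub_eq_zero,
        Int.emod_eq_of_lt hr0 hrlt]
    exact eq_comm
  unfold snakeIdx
  simp only [hmod]
  by_cases hlt : i.emod (2 * n) < n
  · rw [if_pos hlt]
    constructor
    · intro h; exact Or.inl ((key g hg0 (by omega)).mp h)
    · rintro (h | h)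
      · exact (key g hg0 (by omega)).mpr h
      · exfalso
        have := (key (2 * n - 1 - g) (by omega) (by omega)).mpr h
        omega
  · rw [if_neg hlt]
    constructor
    · intro h
      refine Or.inr ((key (2 * n - 1 - g) (by omega) (by omega)).mp ?_)
      omega
    · rintro (h | h)
      · exfalso
        have := (key g hg0 (by omega)).mpr h
        omega
      · have := (key (2 * n - 1 - g) (by omega) (by omega)).mpr h
        omega

-- the snake index is always a valid group index
lemma snake_range (n i : Int) (hn : 1 ≤ n) : 0 ≤ snakeIdx n i ∧ snakeIdx n i < n := by
  have hp : (0:Int) < 2 * n := by omega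
  have hm0 : 0 ≤ PySem.Int.mod i (2 * n) := PySem.Int.mod_nonneg i hp
  have hmlt : PySem.Int.mod i (2 * n) < 2 * n := PySem.Int.mod_lt i hp
  have h : snakeIdx n i = if PySem.Int.mod i (2*n) < n then PySem.Int.mod i (2*n)
      else 2*n - 1 - PySem.Int.mod i (2*n) := rfl
  rw [h]; split <;> omega

lemma foldM_char (n : Int) (hn : 1 ≤ n) (g : Int) (hg0 : 0 ≤ g) (hgn : g < n) :
    ∀ (xs : List (String × Int)) (G : List (List String)) (S : List Int) (i a b : Int),
      G.length = n.toNat → S.length = n.toNat →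
      0 ≤ a → a < b → b < 2 * n →
      ((2 * n ∣ (g - i - a) ∧ 2 * n ∣ (2 * n - 1 - g - i - b)) ∨
       (2 * n ∣ (g - i - b) ∧ 2 * n ∣ (2 * n - 1 - g - i - a))) →
      PySem.List.pyGetD (xs.foldl (pasoM n) ((G, S), i)).1.1 g []
          = PySem.List.pyGetD G g [] ++ (selOff (2 * n) a b xs).map (·.1) ∧
      PySem.List.pyGetD (xs.foldl (pasoM n) ((G, S), i)).1.2 g 0
          = PySem.List.pyGetD S g 0 + ((selOff (2 * n) a b xs).map (·.2)).sum := by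
  intro xs
  induction xs with
  | nil => intro G S i a b hG hS ha0 hab hbp hdvd; simp [selOff]
  | cons x t ih =>
    intro G S i a b hG hS ha0 hab hbp hdvd
    have hgG : g.toNat < G.length := by omega
    have hgS : g.toNat < S.length := by omega
    set G' := PySem.List.pySetD G (snakeIdx n i) (PySem.List.pyGetD G (snakeIdx n i) [] ++ [x.1]) with hG'
    set S' := PySem.List.pySetD S (snakeIdx n i) (PySem.List.pyGetD S (snakeIdx n i) 0 + x.2) with hS'
    have hstep : (x :: t).foldl (pasoM n) ((G, S), i) = t.foldl (pasoM n) ((G', S'), i + 1) := rfl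
    have hG'len : G'.length = n.toNat := by simp [hG', PySem.List.length_pySetD, hG]
    have hS'len : S'.length = n.toNat := by simp [hS', PySem.List.length_pySetD, hS]
    rw [hstep]
    by_cases ha : a = 0
    · subst ha
      -- the snake hits group g now
      have hsnake : snakeIdx n i = g := by
        rw [snake_eq_iff n g i hn hg0 hgn]
        rcases hdvd with ⟨h1, _⟩ | ⟨_, h2⟩
        · exact Or.inl (by simpa using h1)
        · exact Or.inr (by simpa using h2)
      have hd' : ((2 * n ∣ (g - (i+1) - (b-1)) ∧ 2 * n ∣ (2 * n - 1 - g - (i+1) - (2*n-1))) ∨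
                  (2 * n ∣ (g - (i+1) - (2*n-1)) ∧ 2 * n ∣ (2 * n - 1 - g - (i+1) - (b-1)))) := by
        rcases hdvd with ⟨h1, h2⟩ | ⟨h1, h2⟩
        · refine Or.inr ⟨?_, ?_⟩
          · have : g - (i+1) - (2*n-1) = (g - i - 0) - 2 * n := by ring
            rw [this]; exact dvd_sub h1 (dvd_refl _)
          · have : 2 * n - 1 - g - (i+1) - (b-1) = 2 * n - 1 - g - i - b := by ring
            rw [this]; exact h2
        · refine Or.inl ⟨?_, ?_⟩
          · have : g - (i+1) - (b-1) = g - i - b := by ring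
            rw [this]; exact h1
          · have : 2 * n - 1 - g - (i+1) - (2*n-1) = (2 * n - 1 - g - i - 0) - 2 * n := by ring
            rw [this]; exact dvd_sub h2 (dvd_refl _)
      have hIH := ih G' S' (i+1) (b-1) (2*n-1) hG'len hS'len (by omega) (by omega) (by omega) hd'
      have hGslot : PySem.List.pyGetD G' g [] = PySem.List.pyGetD G g [] ++ [x.1] := by
        rw [hG', hsnake]; exact getD_setD_self G g _ [] hg0 hgG
      have hSslot : PySem.List.pyGetD S' g 0 = PySem.List.pyGetD S g 0 + x.2 := by
        rw [hS', hsnake]; exact getD_setD_self S g _ 0 hg0 hgS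
      have hsel : selOff (2*n) (0:Int) b (x :: t) = x :: selOff (2*n) (b-1) (2*n-1) t := by
        rw [selOff]; simp
      rw [hsel]
      constructor
      · rw [hIH.1, hGslot]
        simp
      · rw [hIH.2, hSslot]
        simp
        ring
    · -- the snake misses group g
      have hsnake : snakeIdx n i ≠ g := by
        intro hcon
        rcases (snake_eq_iff n g i hn hg0 hgn).mp hcon with h | h
        · rcases hdvd with ⟨h1, _⟩ | ⟨h1, _⟩
          · have hda : (2:Int) * n ∣ a := by
              have : (a:Int) = (g - i) - (g - i - a) := by ring
              rw [this]; exact dvd_sub h h1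
            have := Int.le_of_dvd (by omega) hda
            omega
          · have hdb : (2:Int) * n ∣ b := by
              have : (b:Int) = (g - i) - (g - i - b) := by ring
              rw [this]; exact dvd_sub h h1
            have := Int.le_of_dvd (by omega) hdb
            omega
        · rcases hdvd with ⟨_, h2⟩ | ⟨_, h2⟩
          · have hdb : (2:Int) * n ∣ b := by
              have : (b:Int) = (2*n-1-g - i) - (2*n-1-g - i - b) := by ring
              rw [this]; exact dvd_sub h h2
            have := Int.le_of_dvd (by omega) hdb
            omega
          · have hda : (2:Int) * n ∣ a := by
              have : (a:Int) = (2*n-1-g - i) - (2*n-1-g - i - a) := by ring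
              rw [this]; exact dvd_sub h h2
            have := Int.le_of_dvd (by omega) hda
            omega
      have hd' : ((2 * n ∣ (g - (i+1) - (a-1)) ∧ 2 * n ∣ (2 * n - 1 - g - (i+1) - (b-1))) ∨
                  (2 * n ∣ (g - (i+1) - (b-1)) ∧ 2 * n ∣ (2 * n - 1 - g - (i+1) - (a-1)))) := by
        rcases hdvd with ⟨h1, h2⟩ | ⟨h1, h2⟩
        · exact Or.inl ⟨by rw [show g - (i+1) - (a-1) = g - i - a by ring]; exact h1,
            by rw [show 2*n-1-g - (i+1) - (b-1) = 2*n-1-g - i - b by ring]; exact h2⟩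
        · exact Or.inr ⟨by rw [show g - (i+1) - (b-1) = g - i - b by ring]; exact h1,
            by rw [show 2*n-1-g - (i+1) - (a-1) = 2*n-1-g - i - a by ring]; exact h2⟩
      have hIH := ih G' S' (i+1) (a-1) (b-1) hG'len hS'len (by omega) (by omega) (by omega) hd'
      have hsr := snake_range n i hn
      have hGslot : PySem.List.pyGetD G' g [] = PySem.List.pyGetD G g [] := by
        rw [hG']; exact getD_setD_ne G _ g _ [] hsr.1 hg0 hsnake hgG
      have hSslot : PySem.List.pyGetD S' g 0 = PySem.List.pyGetD S g 0 := by
        rw [hS']; exact getD_setD_ne S _ g _ 0 hsr.1 hg0 hsnake hgS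
      have hsel : selOff (2*n) a b (x :: t) = selOff (2*n) (a-1) (b-1) t := by
        rw [selOff]; simp [ha]
      rw [hsel]
      exact ⟨by rw [hIH.1, hGslot], by rw [hIH.2, hSslot]⟩

-- interleave of the two strides = selOff
lemma drop_cons_toNat {α : Type} (x : α) (t : List α) (a : Int) (h : 1 ≤ a) :
    (x :: t).drop a.toNat = t.drop (a - 1).toNat := by
  have ha : a.toNat = (a - 1).toNat + 1 := by omega
  rw [ha, List.drop_succ_cons]

lemma strides_selOff {α : Type} (p : Int) (hp : 2 ≤ p) :
    ∀ (ys : List α) (a b : Int), 0 ≤ a → a < b → b < p →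
      inter (everyNth p.toNat (ys.drop a.toNat)) (everyNth p.toNat (ys.drop b.toNat))
        = selOff p a b ys := by
  intro ys
  induction ys with
  | nil => intro a b h0 hab hbp; simp [everyNth, selOff, inter]
  | cons x t ih =>
    intro a b h0 hab hbp
    by_cases ha : a = 0
    · subst ha
      rw [show (0:Int).toNat = 0 from rfl, List.drop_zero,
          drop_cons_toNat x t b (by omega)]
      have h1 : everyNth p.toNat (x :: t) = x :: everyNth p.toNat (t.drop ((p-1).toNat)) := by
        have hpt : p.toNat - 1 = (p - 1).toNat := by omega
        rw [everyNth, hpt]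
      rw [h1]
      have h2 : inter (x :: everyNth p.toNat (t.drop (p-1).toNat))
          (everyNth p.toNat (t.drop (b-1).toNat))
          = x :: inter (everyNth p.toNat (t.drop (b-1).toNat))
              (everyNth p.toNat (t.drop (p-1).toNat)) := by
        simp [inter]
      rw [h2, ih (b-1) (p-1) (by omega) (by omega) (by omega)]
      simp [selOff]
    · rw [drop_cons_toNat x t a (by omega), drop_cons_toNat x t b (by omega),
          ih (a-1) (b-1) (by omega) (by omega) (by omega)]
      simp [selOff, ha]

-- the two strides' lengths differ by at most one
lemma strides_len {α : Type} (p : Int) (hp : 2 ≤ p) :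
    ∀ (ys : List α) (a b : Int), 0 ≤ a → a < b → b < p →
      (everyNth p.toNat (ys.drop b.toNat)).length ≤ (everyNth p.toNat (ys.drop a.toNat)).length ∧
      (everyNth p.toNat (ys.drop a.toNat)).length ≤ (everyNth p.toNat (ys.drop b.toNat)).length + 1 := by
  intro ys
  induction ys with
  | nil => intro a b h0 hab hbp; simp [everyNth]
  | cons x t ih =>
    intro a b h0 hab hbp
    by_cases ha : a = 0
    · subst ha
      rw [show (0:Int).toNat = 0 from rfl, List.drop_zero,
          drop_cons_toNat x t b (by omega)]
      have h1 : everyNth p.toNat (x :: t) = x :: everyNth p.toNat (t.drop ((p-1).toNat)) := by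
        have hpt : p.toNat - 1 = (p - 1).toNat := by omega
        rw [everyNth, hpt]
      rw [h1]
      have := ih (b-1) (p-1) (by omega) (by omega) (by omega)
      simp only [List.length_cons]
      omega
    · rw [drop_cons_toNat x t a (by omega), drop_cons_toNat x t b (by omega)]
      exact ih (a-1) (b-1) (by omega) (by omega) (by omega)

-- B's zip-loop plus tail fixup builds exactly the interleave's names
lemma names_eq_inter : ∀ (u v : List (String × Int)),
    v.length ≤ u.length → u.length ≤ v.length + 1 →
    (if v.length < u.length
      then (u.zip v).foldl (fun acc pq => acc ++ [pq.1.1, pq.2.1]) ([] : List String)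
             ++ [(PySem.List.pyGetD u (-1) ("", 0)).1]
      else (u.zip v).foldl (fun acc pq => acc ++ [pq.1.1, pq.2.1]) ([] : List String))
      = (inter u v).map (·.1)
  | [], v, h1, h2 => by
      have hv : v = [] := List.eq_nil_of_length_eq_zero (by simpa using h1)
      subst hv; simp [inter]
  | x :: u', [], h1, h2 => by
      have hu : u' = [] := List.eq_nil_of_length_eq_zero (by simp only [List.length_cons, List.length_nil] at h2; omega)
      subst hu
      rw [if_pos (by simp)]
      simp [inter, PySem.List.pyGetD_neg_one [x] ("", 0) (by simp)]
  | x :: u', y :: v', h1, h2 => by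
      have ih := names_eq_inter u' v' (by simpa using h1) (by simpa using h2)
      have hfix : ((y :: v').length < (x :: u').length) ↔ (v'.length < u'.length) := by simp
      by_cases hc : v'.length < u'.length
      · have hu' : u' ≠ [] := by intro h; subst h; simp at hc
        rw [if_pos (hfix.mpr hc)] at *
        rw [if_pos hc] at ih
        have hlast : PySem.List.pyGetD (x :: u') (-1) ("", 0) = PySem.List.pyGetD u' (-1) ("", 0) := by
          rw [PySem.List.pyGetD_neg_one (x :: u') ("", 0) (by simp),
              PySem.List.pyGetD_neg_one u' ("", 0) hu', List.getLast_cons hu']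
        simp only [List.zip_cons_cons, List.foldl_cons, List.nil_append,
          PySem.List.foldl_append_eq_flatMap] at ih ⊢
        simp only [inter, List.map_cons, hlast]
        simp [ih]
      · rw [if_neg (fun h => hc (hfix.mp h))]
        rw [if_neg hc] at ih
        simp only [List.zip_cons_cons, List.foldl_cons, List.nil_append,
          PySem.List.foldl_append_eq_flatMap] at ih ⊢
        simp only [inter, List.map_cons]
        simp [ih]

-- interleave is a permutation of the concatenation
lemma inter_perm {α : Type} : ∀ (u v : List α), (inter u v).Perm (u ++ v)
  | [], v => by simp [inter]
  | x :: u, v => by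
      simp only [inter, List.cons_append]
      exact ((inter_perm v u).trans List.perm_append_comm).cons x
termination_by u v => u.length + v.length
decreasing_by simp; omega

-- one group of B, closed under the selOff description
lemma grupoB_eq (p : Int) (hp : 2 ≤ p) (xs : List (String × Int)) (g : Int)
    (hg0 : 0 ≤ g) (hgp : 2 * g < p - 1) :
    grupoB xs p g = ((selOff p g (p - 1 - g) xs).map (·.1),
                     ((selOff p g (p - 1 - g) xs).map (·.2)).sum) := by
  have h0 : 0 ≤ g := hg0
  have hab : g < p - 1 - g := by omega
  have hbp : p - 1 - g < p := by omega
  have hlen := strides_len p hp xs g (p - 1 - g) h0 hab hbp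
  have hsel := strides_selOff p hp xs g (p - 1 - g) h0 hab hbp
  have hnames := names_eq_inter (everyNth p.toNat (xs.drop g.toNat))
    (everyNth p.toNat (xs.drop (p - 1 - g).toNat)) hlen.1 hlen.2
  unfold grupoB strideSlice
  refine Prod.ext ?_ ?_
  · show (if _ then _ else _) = _
    rw [hnames, hsel]
  · show List.foldl _ 0 _ + List.foldl _ 0 _ = _
    rw [PySem.List.foldl_add _ (fun x : String × Int => x.2) 0,
        PySem.List.foldl_add _ (fun x : String × Int => x.2) 0, ← hsel]
    have hperm : (inter (everyNth p.toNat (xs.drop g.toNat))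
        (everyNth p.toNat (xs.drop (p - 1 - g).toNat))).Perm
        (everyNth p.toNat (xs.drop g.toNat) ++ everyNth p.toNat (xs.drop (p - 1 - g).toNat)) :=
      inter_perm _ _
    rw [List.Perm.sum_eq ((hperm.map (fun x => x.2)))]
    simp

-- ===== VERDICT (by name: the statement is the Claim_ definition above) =====
theorem aproximacion2_spec : Claim_equal_aproximacion2 := by
  intro m n _ hpre
  show aproximacion2 m n = aproximacion2_alt m n
  unfold aproximacion2 aproximacion2_alt
  rcases hpre with hn | hnil
  · set xs := PySem.List.sorted m (fun x => x.2) true with hxs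
    rw [PySem.List.foldl_append_singleton_eq_map (fun g => grupoB xs (2 * n) g)]
    have hcore := core n hn xs (List.replicate n.toNat []) (List.replicate n.toNat 0) 0 0
      (by simp) (by simp) le_rfl (by omega) le_rfl
    rw [List.zip_replicate'] at hcore
    have h0n : (0:Int) < n := by omega
    rw [if_pos h0n, show decide ((0:Int) < n) = true from decide_eq_true h0n,
        show (0:Int) + 2 * n * 0 = 0 by ring] at hcore
    show (List.foldl (pasoA n) (List.replicate n.toNat ([], 0), true, (0:Int)) xs).1 = _
    rw [hcore, List.nil_append]
    have hl := foldM_len n xs (List.replicate n.toNat []) (List.replicate n.toNat 0) 0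
    rw [List.length_replicate] at hl
    rw [List.length_replicate] at hl
    apply List.ext_getElem
    · simp [List.length_zip, hl.1, hl.2, PySem.List.length_pyRange_one]
    · intro k h1 h2
      have hk : k < n.toNat := by
        simp only [List.length_map, PySem.List.length_pyRange_one] at h2; omega
      have hchar := foldM_char n hn (k : Int) (Int.natCast_nonneg k) (by omega) xs
        (List.replicate n.toNat []) (List.replicate n.toNat 0) 0 (k : Int) (2 * n - 1 - (k : Int))
        (by simp) (by simp) (Int.natCast_nonneg k) (by omega) (by omega)
        (Or.inl ⟨by rw [show ((k : Int) - 0 - k) = 0 by ring]; exact dvd_zero _,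
                 by rw [show (2 * n - 1 - (k : Int) - 0 - (2 * n - 1 - k)) = 0 by ring]; exact dvd_zero _⟩)
      rw [List.getElem_zip, List.getElem_map, PySem.List.getElem_pyRange_one,
          grupoB_eq (2 * n) (by omega) xs (0 + (k : Int)) (by omega) (by omega)]
      simp only [zero_add]
      have e1 : PySem.List.pyGetD (List.replicate n.toNat ([] : List String)) (k : Int) [] = [] := by
        rw [PySem.List.pyGetD_eq_getElem _ _ (Int.natCast_nonneg k) (by simp; omega)]
        simp
      have e2 : PySem.List.pyGetD (List.replicate n.toNat (0 : Int)) (k : Int) 0 = 0 := by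
        rw [PySem.List.pyGetD_eq_getElem _ _ (Int.natCast_nonneg k) (by simp; omega)]
        simp
      have c1 := hchar.1
      have c2 := hchar.2
      rw [e1, List.nil_append] at c1
      rw [e2, zero_add] at c2
      rw [PySem.List.pyGetD_eq_getElem _ _ (Int.natCast_nonneg k) (by rw [hl.1]; omega)] at c1
      rw [PySem.List.pyGetD_eq_getElem _ _ (Int.natCast_nonneg k) (by rw [hl.2]; omega)] at c2
      simp only [Int.toNat_natCast] at c1 c2
      exact Prod.ext c1 c2
  · subst hnil
    have hsort : PySem.List.sorted ([] : List (String × Int)) (fun x => x.2) true = [] := rfl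
    simp only [hsort, List.foldl_nil]
    rw [PySem.List.foldl_append_singleton_eq_map (fun g => grupoB [] (2 * n) g), List.nil_append]
    have hgnil : ∀ g : Int, grupoB ([] : List (String × Int)) (2 * n) g = ([], 0) := by
      intro g
      have h0 : ∀ s : Int, strideSlice ([] : List (String × Int)) s (2 * n) = [] := by
        intro s; unfold strideSlice; rw [List.drop_nil, everyNth]
      unfold grupoB
      simp [h0]
    show List.replicate n.toNat ([], 0) = _
    rw [List.map_congr_left (fun g _ => hgnil g), List.map_const', PySem.List.length_pyRange_one]
    norm_num
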